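-- pv_equiv track=rewrite | github.com/thaolt007/jpeg_compress | entropy_encode.py | calc_amplitude
-- ===== SOURCE A (Python) =====
-- AC_MODE = True
--
-- def calc_amplitude(input_num, need_bit, mode = AC_MODE):
-- 	##############
-- 	if mode is not AC_MODE and input_num == 0:
-- 		return "0"
-- 	else:
-- 		num = abs(input_num) & 0xffff
-- 		index = 0
-- 		output_string = ""
-- 		###############
-- 		if  input_num >= 0:
-- 			while index < need_bit:
-- 				this_bit = "1" if ((num >> index) & 0x1) else "0"
-- 				output_string = this_bit + output_string
-- 				index += 1
-- 		###############
-- 		else: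
-- 			while index < need_bit:
-- 				this_bit = "0" if ((num >> index) & 0x1) else "1"
-- 				output_string = this_bit + output_string
-- 				index += 1
--
-- 		return output_string
-- ===== SOURCE B (Python) =====
-- AC_MODE = True
--
-- def calc_amplitude(input_num, need_bit, mode = AC_MODE):
--     if mode is not AC_MODE and input_num == 0:
--         return "0"
--     if need_bit <= 0:
--         return ""
--     num = abs(input_num) & 0xffff
--     mask = (1 << need_bit) - 1
--     value = num & mask if input_num >= 0 else (~num) & mask
--     return format(value, '0{}b'.format(need_bit))
-- ===== Notes on version B (the rewrite author's own statement) =====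
-- stated objective: simpler
-- what changed: Replaces the two bit-by-bit string-prepend while loops with a single closed-form masked value ((~num)&mask implements the negative one's-complement branch) rendered by one zero-padded format() call.
import Mathlib
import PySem

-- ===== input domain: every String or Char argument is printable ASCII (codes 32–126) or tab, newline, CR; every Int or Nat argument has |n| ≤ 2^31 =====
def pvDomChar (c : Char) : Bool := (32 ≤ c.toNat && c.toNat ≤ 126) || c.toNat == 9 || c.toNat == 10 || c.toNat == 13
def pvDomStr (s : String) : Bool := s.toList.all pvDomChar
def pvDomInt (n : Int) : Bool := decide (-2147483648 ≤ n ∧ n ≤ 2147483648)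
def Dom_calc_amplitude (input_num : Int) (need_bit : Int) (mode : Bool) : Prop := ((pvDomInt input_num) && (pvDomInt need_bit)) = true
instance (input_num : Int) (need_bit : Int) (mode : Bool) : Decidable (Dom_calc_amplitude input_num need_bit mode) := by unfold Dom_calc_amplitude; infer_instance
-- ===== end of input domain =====

-- B replaces A's two bit-by-bit string-prepend loops with one closed-form masked/complemented
-- value rendered by a single zero-padded binary formatting call (objective: simpler).

-- ===== PORT A =====
-- while index < need_bit (positive branch): prepend "1"/"0" for bit `index` of num.
-- index starts at 0 and only increases, so `index.toNat` is exact for the shift.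
def pvLoopPos (num : Nat) (need_bit : Int) (index : Int) (acc : String) : String :=
  if _h : index < need_bit then
    pvLoopPos num need_bit (index + 1)
      ((if (num >>> index.toNat) &&& 1 = 1 then "1" else "0") ++ acc)
  else acc
termination_by (need_bit - index).toNat
decreasing_by omega

-- negative branch: same loop with the bit complemented
def pvLoopNeg (num : Nat) (need_bit : Int) (index : Int) (acc : String) : String :=
  if _h : index < need_bit then
    pvLoopNeg num need_bit (index + 1)
      ((if (num >>> index.toNat) &&& 1 = 1 then "0" else "1") ++ acc)
  else acc
termination_by (need_bit - index).toNat
decreasing_by omega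

def calc_amplitude (input_num : Int) (need_bit : Int) (mode : Bool) : String :=
  if mode = false ∧ input_num = 0 then "0"
  else
    let num := input_num.natAbs &&& 0xffff   -- abs(input_num) & 0xffff
    if input_num ≥ 0 then pvLoopPos num need_bit 0 ""
    else pvLoopNeg num need_bit 0 ""

-- ===== PORT B =====
-- binary digits of v (no leading zeros), as produced by format(v, 'b') for v ≥ 1
def pvBinCore : Nat → List Char
  | 0 => []
  | n + 1 => pvBinCore ((n + 1) / 2) ++ [if (n + 1) % 2 = 1 then '1' else '0']

-- format(v, 'b')
def pvBinStr (v : Nat) : List Char := if v = 0 then ['0'] else pvBinCore v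

def calc_amplitude_alt (input_num : Int) (need_bit : Int) (mode : Bool) : String :=
  if mode = false ∧ input_num = 0 then "0"
  else if need_bit ≤ 0 then ""
  else
    let n := need_bit.toNat
    let num := input_num.natAbs &&& 0xffff
    let mask := 2 ^ n - 1                     -- (1 << need_bit) - 1
    -- Python's (~num) & mask on num ≥ 0 is exactly (num &&& mask) ^^^ mask
    let value := if input_num ≥ 0 then num &&& mask else (num &&& mask) ^^^ mask
    String.ofList (List.leftpad n '0' (pvBinStr value))   -- format(value, '0{n}b')

-- ===== PRECONDITION & SPEC =====
def Spec_calc_amplitude (input_num : Int) (need_bit : Int) (mode : Bool) (out : String) : Prop := out = calc_amplitude_alt input_num need_bit mode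
instance (input_num : Int) (need_bit : Int) (mode : Bool) (out : String) : Decidable (Spec_calc_amplitude input_num need_bit mode out) := by unfold Spec_calc_amplitude; infer_instance

-- ===== CLAIM (what is proved, stated in full; the proofs are below) =====
def Claim_equal_calc_amplitude : Prop := ∀ (input_num : Int) (need_bit : Int) (mode : Bool), Dom_calc_amplitude input_num need_bit mode → Spec_calc_amplitude input_num need_bit mode (calc_amplitude input_num need_bit mode)

-- ===== LEMMAS AND PROOFS =====

-- the digit A's loops compute for bit i of v, plus its complement
def pvDigit (v : Nat) (i : Nat) : Char := if v.testBit i then '1' else '0'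
def pvDigitC (v : Nat) (i : Nat) : Char := if v.testBit i then '0' else '1'

-- msb-first digit list of the low n bits of v
def pvBits (n : Nat) (v : Nat) : List Char :=
  (List.range n).reverse.map (pvDigit v)

theorem pvShiftBit (num i : Nat) :
    (if (num >>> i) &&& 1 = 1 then ("1" : String) else "0")
      = (String.ofList [pvDigit num i]) := by
  simp [pvDigit, Nat.testBit, Nat.and_one_is_mod, Nat.one_and_eq_mod_two]
  rcases Nat.mod_two_eq_zero_or_one (num >>> i) with h | h <;> simp [h] <;> rfl

theorem pvLoopPos_eq (num : Nat) (need_bit : Int) :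
    ∀ (k : Nat) (idx : Int) (acc : String), 0 ≤ idx → (need_bit - idx).toNat = k →
      pvLoopPos num need_bit idx acc
        = String.ofList ((List.range' idx.toNat k).reverse.map (pvDigit num) ++ acc.toList) := by
  intro k
  induction k with
  | zero =>
      intro idx acc h0 hk
      have hlt : ¬ (idx < need_bit) := by omega
      rw [pvLoopPos, dif_neg hlt]
      simp
  | succ k ih =>
      intro idx acc h0 hk
      rw [pvLoopPos, dif_pos (by omega)]
      rw [ih (idx + 1) _ (by omega) (by omega)]
      have h1 : (idx + 1).toNat = idx.toNat + 1 := by omega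
      have h2 : List.range' idx.toNat (k + 1) = idx.toNat :: List.range' (idx.toNat + 1) k := by
        simp [List.range'_succ]
      rw [pvShiftBit]
      simp [h1, h2, String.toList_append]

theorem pvShiftBitC (num i : Nat) :
    (if (num >>> i) &&& 1 = 1 then ("0" : String) else "1")
      = (String.ofList [pvDigitC num i]) := by
  simp [pvDigitC, Nat.testBit, Nat.and_one_is_mod, Nat.one_and_eq_mod_two]
  rcases Nat.mod_two_eq_zero_or_one (num >>> i) with h | h <;> simp [h] <;> rfl

theorem pvLoopNeg_eq (num : Nat) (need_bit : Int) :
    ∀ (k : Nat) (idx : Int) (acc : String), 0 ≤ idx → (need_bit - idx).toNat = k →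
      pvLoopNeg num need_bit idx acc
        = String.ofList ((List.range' idx.toNat k).reverse.map (pvDigitC num) ++ acc.toList) := by
  intro k
  induction k with
  | zero =>
      intro idx acc h0 hk
      have hlt : ¬ (idx < need_bit) := by omega
      rw [pvLoopNeg, dif_neg hlt]
      simp
  | succ k ih =>
      intro idx acc h0 hk
      rw [pvLoopNeg, dif_pos (by omega)]
      rw [ih (idx + 1) _ (by omega) (by omega)]
      have h1 : (idx + 1).toNat = idx.toNat + 1 := by omega
      have h2 : List.range' idx.toNat (k + 1) = idx.toNat :: List.range' (idx.toNat + 1) k := by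
        simp [List.range'_succ]
      rw [pvShiftBitC]
      simp [h1, h2, String.toList_append]

-- the msb-first list peels off the lsb at the right end
theorem pvBits_succ (n v : Nat) :
    pvBits (n + 1) v = pvBits n (v / 2) ++ [if v.testBit 0 then '1' else '0'] := by
  unfold pvBits
  simp only [List.range_succ_eq_map, List.reverse_cons, List.map_append,
    List.map_reverse, List.map_map]
  congr 1
  · congr 1
    apply List.map_congr_left
    intro i _
    simp [pvDigit, Function.comp, Nat.testBit_succ]

theorem pvBinCore_len_pos (v : Nat) (h : 0 < v) : pvBinCore v ≠ [] := by
  cases v with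
  | zero => omega
  | succ n => simp [pvBinCore]

theorem pvBinCore_two (m : Nat) :
    pvBinCore (m + 2) = pvBinCore ((m + 2) / 2) ++ [if (m + 2) % 2 = 1 then '1' else '0'] := by
  conv_lhs => rw [pvBinCore]

-- zero-padding the plain binary rendering to width n gives the msb-first low-n-bits list
theorem pvPad_eq (n : Nat) : ∀ v : Nat, v < 2 ^ (n + 1) →
    List.leftpad (n + 1) '0' (pvBinStr v) = pvBits (n + 1) v := by
  induction n with
  | zero =>
      intro v hv
      interval_cases v
      · simp [pvBinStr, pvBits, pvDigit, List.leftpad]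
      · show List.leftpad 1 '0' (pvBinCore 1) = _
        rw [pvBinCore]
        simp [pvBinCore, pvBits, pvDigit, List.leftpad]
  | succ n ih =>
      intro v hv
      rw [pvBits_succ]
      rw [← ih (v / 2) (by omega)]
      match v, hv with
      | 0, _ => simp [pvBinStr, List.leftpad, List.replicate_succ']
      | 1, _ =>
          show List.leftpad (n + 2) '0' (pvBinCore 1) = _
          rw [pvBinCore]
          simp [pvBinCore, pvBinStr, List.leftpad, List.replicate_succ']
      | (m + 2), hv =>
          have h2 : pvBinStr (m + 2) = pvBinCore ((m + 2) / 2) ++ [if (m + 2) % 2 = 1 then '1' else '0'] := by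
            rw [pvBinStr, if_neg (by omega)]
            exact pvBinCore_two m
          have hq : 0 < (m + 2) / 2 := by omega
          have h3 : pvBinStr ((m + 2) / 2) = pvBinCore ((m + 2) / 2) := by
            rw [pvBinStr, if_neg (by omega)]
          have hb : (m + 2).testBit 0 = decide ((m + 2) % 2 = 1) := Nat.testBit_zero _
          have hne : pvBinCore ((m + 2) / 2) ≠ [] := pvBinCore_len_pos _ hq
          have hlen : 1 ≤ (pvBinCore ((m + 2) / 2)).length := List.length_pos_iff.mpr hne
          rw [h2, h3, List.leftpad, List.leftpad, hb]
          simp only [List.length_append, List.length_cons, List.length_nil]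
          have heq : n + 1 + 1 - ((pvBinCore ((m + 2) / 2)).length + (0 + 1))
               = n + 1 - (pvBinCore ((m + 2) / 2)).length := by omega
          rw [heq, List.append_assoc]
          simp

-- ===== VERDICT (by name: the statement is the Claim_ definition above) =====
theorem calc_amplitude_spec : Claim_equal_calc_amplitude := by
  intro input_num need_bit mode _
  unfold Spec_calc_amplitude calc_amplitude calc_amplitude_alt
  by_cases hg : mode = false ∧ input_num = 0
  · simp [hg]
  · rw [if_neg hg, if_neg hg]
    simp only []
    set num := input_num.natAbs &&& 0xffff with hnum
    by_cases hnb : need_bit ≤ 0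
    · rw [if_pos hnb]
      by_cases hpos : input_num ≥ 0
      · rw [if_pos hpos, pvLoopPos_eq num need_bit 0 0 "" (le_refl 0) (by omega)]
        simp
      · rw [if_neg hpos, pvLoopNeg_eq num need_bit 0 0 "" (le_refl 0) (by omega)]
        simp
    · rw [if_neg hnb]
      obtain ⟨n, hn⟩ : ∃ n : Nat, need_bit.toNat = n + 1 := ⟨need_bit.toNat - 1, by omega⟩
      have hk : (need_bit - 0).toNat = n + 1 := by omega
      have hrange : List.range' 0 (n + 1) = List.range (n + 1) := List.range_eq_range'.symm
      by_cases hpos : input_num ≥ 0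
      · rw [if_pos hpos, if_pos hpos, pvLoopPos_eq num need_bit (n + 1) 0 "" (le_refl 0) hk]
        have hvlt : num &&& (2 ^ (n + 1) - 1) < 2 ^ (n + 1) := by
          have h1 := Nat.and_le_right (n := num) (m := 2 ^ (n + 1) - 1)
          have h2 : (0:Nat) < 2 ^ (n + 1) := Nat.two_pow_pos _
          omega
        rw [hn, pvPad_eq n _ hvlt]
        simp only [Int.toNat_zero, hrange, pvBits]
        have hemp : ("" : String).toList = [] := rfl
        rw [hemp, List.append_nil]
        congr 1
        apply List.map_congr_left
        intro i hi
        have hilt : i < n + 1 := by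
          simpa using (List.mem_range.mp (List.mem_reverse.mp hi))
        simp [pvDigit, hilt]
      · rw [if_neg hpos, if_neg hpos, pvLoopNeg_eq num need_bit (n + 1) 0 "" (le_refl 0) hk]
        have hvlt : (num &&& (2 ^ (n + 1) - 1)) ^^^ (2 ^ (n + 1) - 1) < 2 ^ (n + 1) := by
          apply Nat.xor_lt_two_pow
          · have h1 := Nat.and_le_right (n := num) (m := 2 ^ (n + 1) - 1)
            have h2 : (0:Nat) < 2 ^ (n + 1) := Nat.two_pow_pos _
            omega
          · have h2 : (0:Nat) < 2 ^ (n + 1) := Nat.two_pow_pos _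
            omega
        rw [hn, pvPad_eq n _ hvlt]
        simp only [Int.toNat_zero, hrange, pvBits]
        have hemp : ("" : String).toList = [] := rfl
        rw [hemp, List.append_nil]
        congr 1
        apply List.map_congr_left
        intro i hi
        have hilt : i < n + 1 := by
          simpa using (List.mem_range.mp (List.mem_reverse.mp hi))
        simp only [pvDigit, pvDigitC, Nat.testBit_xor, Nat.testBit_and,
              Nat.testBit_two_pow_sub_one, hilt, decide_true, Bool.and_true]
        cases num.testBit i <;> simp
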